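-- pv_equiv track=rewrite | github.com/nvrtmd/algorithm-solving | Programmers/Programmers 046.py | solution
-- ===== SOURCE A (Python) =====
-- def solution(n, times):
--     start = min(times)
--     end = max(times) * n
--
--     while start < end:
--         mid = (start + end) // 2
--         customer = 0
--         for time in times:
--             customer += mid // time
--         if customer >= n:
--             end = mid
--         else:
--             start = mid + 1
--     return start
-- ===== SOURCE B (Python) =====
-- def solution(n, times):
--     # Group the stations by duration once, then bisect recursively: each probe
--     # counts served customers over the distinct durations with multiplicities.
--     freq = {}
--     for t in times:
--         freq[t] = freq.get(t, 0) + 1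
--     stations = list(freq.items())
--
--     def served(tick):
--         return sum(cnt * (tick // t) for t, cnt in stations)
--
--     def search(lo, hi):
--         if lo >= hi:
--             return lo
--         mid = (lo + hi) // 2
--         if served(mid) >= n:
--             return search(lo, mid)
--         return search(mid + 1, hi)
--
--     return search(min(times), max(times) * n)
-- ===== Notes on version B (the rewrite author's own statement) =====
-- stated objective: alternative
-- what changed: Builds a duration-to-multiplicity table once so each probe counts served customers over the distinct durations (weighted by count) instead of rescanning the raw list, and replaces the imperative while-loop bisection with a recursive halving search.
import Mathlib
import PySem

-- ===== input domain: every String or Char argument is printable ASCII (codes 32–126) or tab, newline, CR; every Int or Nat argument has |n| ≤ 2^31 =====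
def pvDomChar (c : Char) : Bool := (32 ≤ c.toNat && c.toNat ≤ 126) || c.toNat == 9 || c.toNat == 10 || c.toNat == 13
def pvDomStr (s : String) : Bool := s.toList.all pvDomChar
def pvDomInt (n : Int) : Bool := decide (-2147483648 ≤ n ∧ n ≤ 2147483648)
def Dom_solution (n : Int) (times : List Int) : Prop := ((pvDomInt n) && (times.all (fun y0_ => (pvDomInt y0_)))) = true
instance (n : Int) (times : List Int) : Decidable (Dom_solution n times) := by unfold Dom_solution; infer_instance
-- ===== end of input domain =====

-- B groups the stations into a duration → multiplicity table built once, so each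
-- probe counts over the distinct durations, and replaces the imperative while
-- loop with a recursive halving search (objective: alternative; same asymptotics).

-- ===== PORT A =====
-- customer = 0; for time in times: customer += mid // time
def pyCount (times : List Int) (mid : Int) : Int :=
  times.foldl (fun customer time => customer + PySem.Int.floordiv mid time) 0

-- while start < end: mid = (start+end)//2; … ; return start
-- (fuel-based structural recursion; (end-start).toNat + 1 steps always suffice
-- because the interval shrinks by at least one each round)
def aLoop (n : Int) (times : List Int) : Nat → Int → Int → Int
  | 0, start, _stop => start
  | fuel + 1, start, stop =>
    if start < stop then
      let mid := PySem.Int.floordiv (start + stop) 2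
      if pyCount times mid ≥ n then aLoop n times fuel start mid
      else aLoop n times fuel (mid + 1) stop
    else start

def solution (n : Int) (times : List Int) : Int :=
  let start := (PySem.List.min? times (fun x => x)).getD 0
  let stop := (PySem.List.max? times (fun x => x)).getD 0 * n
  aLoop n times ((stop - start).toNat + 1) start stop

-- ===== PORT B =====
-- freq = {}; for t in times: freq[t] = freq.get(t, 0) + 1
def bFreq (times : List Int) : PySem.Dict Int Int :=
  times.foldl (fun freq t => freq.insert t (freq.getD t 0 + 1)) PySem.Dict.empty

-- sum(cnt * (tick // t) for t, cnt in stations)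
def bServed (stations : List (Int × Int)) (tick : Int) : Int :=
  (stations.map (fun p => p.2 * PySem.Int.floordiv tick p.1)).sum

-- def search(lo, hi): … recursive halving (same fuel bound as A's loop)
def bSearch (n : Int) (stations : List (Int × Int)) : Nat → Int → Int → Int
  | 0, lo, _hi => lo
  | fuel + 1, lo, hi =>
    if lo ≥ hi then lo
    else
      let mid := PySem.Int.floordiv (lo + hi) 2
      if bServed stations mid ≥ n then bSearch n stations fuel lo mid
      else bSearch n stations fuel (mid + 1) hi

def solution_alt (n : Int) (times : List Int) : Int :=
  let stations := (bFreq times).items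
  let lo := (PySem.List.min? times (fun x => x)).getD 0
  let hi := (PySem.List.max? times (fun x => x)).getD 0 * n
  bSearch n stations ((hi - lo).toNat + 1) lo hi

-- ===== PRECONDITION & SPEC =====
-- Exactly the inputs on which A returns: A raises ValueError on [], and raises
-- ZeroDivisionError iff 0 ∈ times and the loop is entered (min(times) < max(times)*n).
def Pre_solution (n : Int) (times : List Int) : Prop :=
  times ≠ [] ∧ ((0:Int) ∈ times →
    ¬ ((PySem.List.min? times (fun x => x)).getD 0
        < (PySem.List.max? times (fun x => x)).getD 0 * n))
instance (n : Int) (times : List Int) : Decidable (Pre_solution n times) := by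
  unfold Pre_solution; infer_instance

def pvWitness_solution : Int × List Int := (6, [7, 10])

def Spec_solution (n : Int) (times : List Int) (out : Int) : Prop := out = solution_alt n times
instance (n : Int) (times : List Int) (out : Int) : Decidable (Spec_solution n times out) := by unfold Spec_solution; infer_instance

-- ===== CLAIM (what is proved, stated in full; the proofs are below) =====
def Claim_equal_solution : Prop := ∀ (n : Int) (times : List Int), Dom_solution n times → Pre_solution n times → Spec_solution n times (solution n times)

-- ===== LEMMAS AND PROOFS =====

-- the multiplicity table of B is PySem's counter
theorem bFreq_eq_counter (times : List Int) : bFreq times = PySem.Dict.counter times :=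
  PySem.Dict.foldl_insert_getD_add_one_eq_counter times

-- a sum over a list equals the sum over its distinct values weighted by count
theorem sum_map_eq_sum_counted (times : List Int) (f : Int → Int) :
    ((PySem.Set.ofList times).map (fun k => (times.count k : Int) * f k)).sum
      = (times.map f).sum := by
  have h1 : ((PySem.Set.ofList times).map (fun k => (times.count k : Int) * f k)).sum
      = (PySem.Set.ofList times).toFinset.sum (fun k => (times.count k : Int) * f k) :=
    (List.sum_toFinset _ (PySem.Set.nodup_ofList times)).symm
  have h2 : (PySem.Set.ofList times).toFinset = times.toFinset := by
    apply Finset.ext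
    intro a
    simp [List.mem_toFinset, PySem.Set.mem_ofList]
  have h3 := Finset.sum_multiset_map_count (times : Multiset Int) f
  simp only [Multiset.map_coe, Multiset.sum_coe, Multiset.coe_count] at h3
  rw [h1, h2]
  have h4 : (Multiset.toFinset (times : Multiset Int)) = times.toFinset := rfl
  rw [h4] at h3
  rw [h3]
  apply Finset.sum_congr rfl
  intro x _
  simp

-- B's per-probe count equals A's inner loop
theorem served_eq (times : List Int) (tick : Int) :
    bServed ((bFreq times).items) tick = pyCount times tick := by
  rw [bFreq_eq_counter, PySem.Dict.items_counter]
  unfold bServed pyCount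
  rw [PySem.List.foldl_add times (fun t => PySem.Int.floordiv tick t) 0]
  simp only [List.map_map, zero_add]
  exact sum_map_eq_sum_counted times (fun t => PySem.Int.floordiv tick t)

-- same trajectory, step for step
theorem search_eq (n : Int) (times : List Int) :
    ∀ (fuel : Nat) (lo hi : Int),
      bSearch n ((bFreq times).items) fuel lo hi = aLoop n times fuel lo hi := by
  intro fuel
  induction fuel with
  | zero => intro lo hi; rfl
  | succ fuel ih =>
    intro lo hi
    rw [bSearch, aLoop]
    by_cases hlt : lo < hi
    · rw [if_neg (by omega : ¬ lo ≥ hi), if_pos hlt]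
      simp only [served_eq, ih]
    · rw [if_pos (by omega : lo ≥ hi), if_neg hlt]

-- ===== VERDICT (by name: the statement is the Claim_ definition above) =====
theorem solution_spec : Claim_equal_solution := by
  intro n times _hdom _hpre
  show solution n times = solution_alt n times
  unfold solution solution_alt
  exact (search_eq n times _ _ _).symm
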